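-- pv_equiv track=rewrite | github.com/ABI-Software/scaffoldmaker | src/scaffoldmaker/utils/bifurcation.py | rearrangeNodeIds
-- ===== SOURCE A (Python) =====
-- def rearrangeNodeIds(nodeIds, ellipseParameters):
--     """
--     A helper function for rearranging node ids in a list to be circular, similar to other tube node ids rotating in a
--     clockwise direction.
--     :param nodeIds: A list of node ids.
--     :param ellipseParameters: A list of parameters required to form an ellipse.
--     :return: A list of node ids rearranged in a circular format.
--     """
--     idx = ellipseParameters[1] - 1 - 2 * (ellipseParameters[2] - 1)
--     lst = nodeIds[-idx::]
--     lst.reverse()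
--     nodeIds[-idx::] = lst
--
--     start = ellipseParameters[0] - 4 - 2 * (ellipseParameters[2] - 1)
--     for j in range(int(start), -1, -1):
--         nodeIds.append(nodeIds.pop(idx + 2 * j))
--
--     nloop = int(ellipseParameters[1] / 2 - ellipseParameters[2])
--     for i in range(nloop):
--         nodeIds.insert(len(nodeIds), nodeIds.pop(0))
--
--     return nodeIds
-- ===== SOURCE B (Python) =====
-- def rearrangeNodeIds(nodeIds, ellipseParameters):
--     """
--     Rearrange node ids into circular order.
--     Builds and returns a new list in three single passes (slice reversal of the
--     tail, one partition pass for the elements moved to the back, one slice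
--     rotation) instead of element-by-element surgery.
--     """
--     idx = ellipseParameters[1] - 1 - 2 * (ellipseParameters[2] - 1)
--     arr = nodeIds[:-idx] + nodeIds[-idx:][::-1]
--
--     start = ellipseParameters[0] - 4 - 2 * (ellipseParameters[2] - 1)
--     if start >= 0:
--         # every second element of the window [idx, idx + 2*start] goes to the
--         # back, last one first
--         in_window = lambda i: idx <= i <= idx + 2 * start and (i - idx) % 2 == 0
--         kept = [x for i, x in enumerate(arr) if not in_window(i)]
--         moved = [x for i, x in enumerate(arr) if in_window(i)]
--         arr = kept + moved[::-1]
--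
--     nloop = int(ellipseParameters[1] / 2 - ellipseParameters[2])
--     if nloop > 0:
--         r = nloop % len(arr)
--         arr = arr[r:] + arr[:r]
--     return arr
-- ===== Notes on version B (the rewrite author's own statement) =====
-- stated objective: alternative
-- what changed: Replaces A's in-place surgery (a pop/append loop that moves one element per iteration and an nloop-step one-position rotation loop) by single passes: one partition pass over enumerate separating kept and moved elements, and a single slice rotation by nloop %% len; B returns a new list instead of mutating nodeIds in place (return value is identical). …
-- outside the precondition, e.g. on rearrangeNodeIds([1, 2, 3, 4], [-2, -8, -2]): A returns [1, 3, 4, 2], B returns [1, 2, 3, 4]; on rearrangeNodeIds([1, 2, 3, 4], [4, 0, 1]): A returns [1, 4, 3, 2], B returns [1, 4, 3, 2]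
import Mathlib
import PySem

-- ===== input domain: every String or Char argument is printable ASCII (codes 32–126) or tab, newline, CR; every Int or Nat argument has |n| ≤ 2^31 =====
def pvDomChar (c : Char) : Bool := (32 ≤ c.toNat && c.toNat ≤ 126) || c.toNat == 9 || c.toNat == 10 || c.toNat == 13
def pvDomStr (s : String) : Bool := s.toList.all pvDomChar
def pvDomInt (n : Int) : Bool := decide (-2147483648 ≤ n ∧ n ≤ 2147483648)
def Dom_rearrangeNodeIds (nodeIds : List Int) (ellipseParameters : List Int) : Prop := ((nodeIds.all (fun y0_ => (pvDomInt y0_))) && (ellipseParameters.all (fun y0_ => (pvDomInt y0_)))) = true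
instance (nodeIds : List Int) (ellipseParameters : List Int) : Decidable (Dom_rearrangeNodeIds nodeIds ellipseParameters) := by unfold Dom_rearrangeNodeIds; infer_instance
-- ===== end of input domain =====

-- B replaces A's quadratic pop/append surgery and step-by-step rotation by single passes
-- (one partition pass over enumerate, a slice rotation by nloop mod len); equivalence is
-- about the RETURN value only (the Python A mutates nodeIds in place, the Python B
-- returns a new list).


-- ===== PORT A =====
def rearrangeNodeIds (nodeIds : List Int) (ellipseParameters : List Int) : List Int :=
  let e0 := PySem.List.pyGetD ellipseParameters 0 0   -- Pre_ requires length ≥ 3, so the defaults are never reached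
  let e1 := PySem.List.pyGetD ellipseParameters 1 0
  let e2 := PySem.List.pyGetD ellipseParameters 2 0
  let idx := e1 - 1 - 2 * (e2 - 1)
  -- lst = nodeIds[-idx::]; lst.reverse(); nodeIds[-idx::] = lst
  let arr1 := PySem.List.slice nodeIds none (some (-idx)) ++ (PySem.List.slice nodeIds (some (-idx)) none).reverse
  let start := e0 - 4 - 2 * (e2 - 1)
  -- for j in range(int(start), -1, -1): nodeIds.append(nodeIds.pop(idx + 2*j))
  let arr2 := (PySem.List.pyRange start (-1) (-1)).foldl (fun st j =>
      match PySem.List.pop? st (idx + 2 * j) with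
      | some (x, rest) => rest ++ [x]
      | none => st) arr1
  -- nloop = int(e1/2 - e2): truncation toward zero; the float arithmetic is exact on Dom
  let nloop := Int.tdiv (e1 - 2 * e2) 2
  -- for i in range(nloop): nodeIds.insert(len(nodeIds), nodeIds.pop(0))  (len is evaluated before the pop)
  (PySem.List.pyRange 0 nloop 1).foldl (fun st _ =>
      match PySem.List.pop? st 0 with
      | some (x, rest) => PySem.List.insert rest (st.length : Int) x
      | none => st) arr2

-- ===== PORT B =====
def rearrangeNodeIds_alt (nodeIds : List Int) (ellipseParameters : List Int) : List Int :=
  let e0 := PySem.List.pyGetD ellipseParameters 0 0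
  let e1 := PySem.List.pyGetD ellipseParameters 1 0
  let e2 := PySem.List.pyGetD ellipseParameters 2 0
  let idx := e1 - 1 - 2 * (e2 - 1)
  -- arr = nodeIds[:-idx] + nodeIds[-idx:][::-1]
  let arr := PySem.List.slice nodeIds none (some (-idx)) ++ (PySem.List.slice nodeIds (some (-idx)) none).reverse
  let start := e0 - 4 - 2 * (e2 - 1)
  let arr2 := if 0 ≤ start then
      -- in_window = lambda i: idx <= i <= idx + 2*start and (i - idx) % 2 == 0
      let inWindow : Int → Bool := fun i =>
        decide (idx ≤ i) && decide (i ≤ idx + 2 * start) && (PySem.Int.mod (i - idx) 2 == 0)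
      -- kept = [x for i, x in enumerate(arr) if not in_window(i)]
      let kept := ((PySem.List.enumerate arr).filter (fun q => !(inWindow q.1))).map (fun q => q.2)
      -- moved = [x for i, x in enumerate(arr) if in_window(i)]
      let moved := ((PySem.List.enumerate arr).filter (fun q => inWindow q.1)).map (fun q => q.2)
      kept ++ moved.reverse
    else arr
  -- nloop = int(e1/2 - e2): truncation toward zero; the float arithmetic is exact on Dom
  let nloop := Int.tdiv (e1 - 2 * e2) 2
  if 0 < nloop then
    -- r = nloop % len(arr); arr = arr[r:] + arr[:r]
    let r := PySem.Int.mod nloop (arr2.length : Int)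
    arr2.drop r.toNat ++ arr2.take r.toNat
  else arr2

-- ===== PRECONDITION & SPEC =====
-- Pre_ holds where the Python A returns normally (the three ellipseParameters entries
-- exist, every pop index of the second phase is in range, the rotation loop never pops
-- from an empty list) and, in addition, excludes the degenerate corner where the second
-- phase starts at a negative offset (0 ≤ s with idx < 0): there A moves elements through
-- Python's negative-index wraparound — a parameter combination outside the function's
-- purpose for which neither value would be specified.
def Pre_rearrangeNodeIds (nodeIds : List Int) (ellipseParameters : List Int) : Prop :=
  3 ≤ ellipseParameters.length ∧
  (let n : Int := nodeIds.length
   let e0 := PySem.List.pyGetD ellipseParameters 0 0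
   let e1 := PySem.List.pyGetD ellipseParameters 1 0
   let e2 := PySem.List.pyGetD ellipseParameters 2 0
   let idx := e1 - 1 - 2 * (e2 - 1)
   let s := e0 - 4 - 2 * (e2 - 1)
   (0 ≤ s → 0 < n ∧ 0 ≤ idx ∧ idx + 2 * s < n) ∧
   (0 < Int.tdiv (e1 - 2 * e2) 2 → 0 < n))
instance (nodeIds : List Int) (ellipseParameters : List Int) : Decidable (Pre_rearrangeNodeIds nodeIds ellipseParameters) := by unfold Pre_rearrangeNodeIds; infer_instance
def pvWitness_rearrangeNodeIds : List Int × List Int := ([1, 2, 3, 4, 5, 6, 7, 8], [6, 8, 2])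

def Spec_rearrangeNodeIds (nodeIds : List Int) (ellipseParameters : List Int) (out : List Int) : Prop := out = rearrangeNodeIds_alt nodeIds ellipseParameters
instance (nodeIds : List Int) (ellipseParameters : List Int) (out : List Int) : Decidable (Spec_rearrangeNodeIds nodeIds ellipseParameters out) := by unfold Spec_rearrangeNodeIds; infer_instance

-- ===== CLAIM (what is proved, stated in full; the proofs are below) =====
def Claim_equal_rearrangeNodeIds : Prop := ∀ (nodeIds : List Int) (ellipseParameters : List Int), Dom_rearrangeNodeIds nodeIds ellipseParameters → Pre_rearrangeNodeIds nodeIds ellipseParameters → Spec_rearrangeNodeIds nodeIds ellipseParameters (rearrangeNodeIds nodeIds ellipseParameters)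

-- ===== LEMMAS AND PROOFS =====
theorem pv_mapRange_getD (xs : List Int) : (List.range xs.length).map (fun i => xs.getD i 0) = xs := by
  apply List.ext_getElem
  · simp
  · intro i h1 h2
    simp [List.getD_eq_getElem?_getD, List.getElem?_eq_getElem h2]

theorem pv_getD_append_right (X Z : List Int) (j : Nat) : (X ++ Z).getD (X.length + j) 0 = Z.getD j 0 := by
  simp [List.getD_eq_getElem?_getD, List.getElem?_append_right]

theorem pv_filterMapRange_append (X Z : List Int) (p : Nat → Bool) :
    ((List.range (X ++ Z).length).filter p).map (fun i => (X ++ Z).getD i 0)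
    = ((List.range X.length).filter p).map (fun i => X.getD i 0)
      ++ ((List.range Z.length).filter (fun j => p (X.length + j))).map (fun j => Z.getD j 0) := by
  rw [List.length_append, List.range_add, List.filter_append, List.map_append]
  congr 1
  · apply List.map_congr_left
    intro i hi
    have hi' : i < X.length := by
      have := List.mem_range.mp (List.mem_of_mem_filter hi); omega
    exact List.getD_append X Z 0 i hi'
  · rw [List.filter_map, List.map_map]
    apply List.map_congr_left
    intro j hj
    simp only [Function.comp]
    exact pv_getD_append_right X Z j

def pvSel (a t i : Nat) : Bool := decide (a ≤ i) && decide (i ≤ a + 2*t) && decide ((i - a) % 2 = 0)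

theorem pvSel_eq_decide (a t i : Nat) : pvSel a t i = decide (a ≤ i ∧ i ≤ a + 2*t ∧ (i - a) % 2 = 0) := by
  simp [pvSel, Bool.and_assoc]

theorem pvSel_false_of_gt (a t i : Nat) (h : a + 2*t < i) : pvSel a t i = false := by
  rw [pvSel_eq_decide]; simp; omega

theorem pvSel_false_of_lt (a t i : Nat) (h : i < a) : pvSel a t i = false := by
  rw [pvSel_eq_decide]; simp; omega

theorem pvSel_top (a t : Nat) : pvSel a t (a + 2*t) = true := by
  rw [pvSel_eq_decide]; simp

theorem pvSel_cast (a t i : Nat) (h : i < a + 2*t + 2) : pvSel a (t+1) i = pvSel a t i := by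
  rw [pvSel_eq_decide, pvSel_eq_decide]
  simp only [decide_eq_decide]
  omega

def pvKept (arr : List Int) (a t : Nat) : List Int :=
  ((List.range arr.length).filter (fun i => !pvSel a t i)).map (fun i => arr.getD i 0)

def pvMoved (arr : List Int) (a t : Nat) : List Int :=
  ((List.range arr.length).filter (fun i => pvSel a t i)).map (fun i => arr.getD i 0)

theorem pv_allTrue_seg (Z : List Int) (p : Nat → Bool) (h : ∀ j < Z.length, p j = true) :
    ((List.range Z.length).filter p).map (fun j => Z.getD j 0) = Z := by
  rw [List.filter_eq_self.mpr, pv_mapRange_getD]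
  intro j hj
  exact h j (List.mem_range.mp hj)

theorem pv_allFalse_seg (Z : List Int) (p : Nat → Bool) (h : ∀ j < Z.length, p j = false) :
    ((List.range Z.length).filter p).map (fun j => Z.getD j 0) = [] := by
  rw [List.filter_eq_nil_iff.mpr]
  · rfl
  · intro j hj
    simp [h j (List.mem_range.mp hj)]

theorem pv_consSeg_kept (v : Int) (Y : List Int) (p : Nat → Bool) (h0 : p 0 = false)
    (h1 : ∀ j, p (j+1) = true) :
    ((List.range (v :: Y).length).filter p).map (fun j => (v :: Y).getD j 0) = Y := by
  rw [List.length_cons, List.range_succ_eq_map, List.filter_cons_of_neg (by simp [h0]),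
    List.filter_map, List.map_map]
  have : List.filter (p ∘ Nat.succ) (List.range Y.length) = List.range Y.length := by
    apply List.filter_eq_self.mpr
    intro j hj
    simpa using h1 j
  rw [this]
  have : ((fun j => (v :: Y).getD j 0) ∘ Nat.succ) = fun j => Y.getD j 0 := by
    funext j
    simp [Function.comp]
  rw [this, pv_mapRange_getD]

theorem pv_consSeg_moved (v : Int) (Y : List Int) (p : Nat → Bool) (h0 : p 0 = true)
    (h1 : ∀ j, p (j+1) = false) :
    ((List.range (v :: Y).length).filter p).map (fun j => (v :: Y).getD j 0) = [v] := by
  rw [List.length_cons, List.range_succ_eq_map, List.filter_cons_of_pos (by simp [h0]),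
    List.filter_map]
  have : List.filter (p ∘ Nat.succ) (List.range Y.length) = [] := by
    apply List.filter_eq_nil_iff.mpr
    intro j hj
    simpa using h1 j
  simp [this]

theorem pvKept_append_past (X Z : List Int) (a t : Nat) (h : a + 2*t < X.length) :
    pvKept (X ++ Z) a t = pvKept X a t ++ Z := by
  unfold pvKept
  rw [pv_filterMapRange_append]
  congr 1
  apply pv_allTrue_seg
  intro j hj
  simp [pvSel_false_of_gt a t (X.length + j) (by omega)]

theorem pvMoved_append_past (X Z : List Int) (a t : Nat) (h : a + 2*t < X.length) :
    pvMoved (X ++ Z) a t = pvMoved X a t := by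
  unfold pvMoved
  have h2 : ((List.range Z.length).filter (fun j => pvSel a t (X.length + j))).map
      (fun j => Z.getD j 0) = [] :=
    pv_allFalse_seg Z _ (fun j hj => pvSel_false_of_gt a t (X.length + j) (by omega))
  rw [pv_filterMapRange_append, h2, List.append_nil]

theorem pvKept_top (X Y : List Int) (v : Int) (a t : Nat) (hX : X.length = a + 2*t) :
    pvKept (X ++ v :: Y) a t = pvKept X a t ++ Y := by
  unfold pvKept
  rw [pv_filterMapRange_append]
  congr 1
  apply pv_consSeg_kept
  · simp [hX, pvSel_top]
  · intro j
    simp [pvSel_false_of_gt a t (X.length + (j+1)) (by omega)]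

theorem pvMoved_top (X Y : List Int) (v : Int) (a t : Nat) (hX : X.length = a + 2*t) :
    pvMoved (X ++ v :: Y) a t = pvMoved X a t ++ [v] := by
  unfold pvMoved
  rw [pv_filterMapRange_append]
  congr 1
  apply pv_consSeg_moved
  · simp [hX, pvSel_top]
  · intro j
    exact pvSel_false_of_gt a t (X.length + (j+1)) (by omega)

theorem pvKept_shrink (X : List Int) (a t : Nat) (hX : X.length ≤ a + 2*t + 2) :
    pvKept X a (t+1) = pvKept X a t := by
  unfold pvKept
  congr 1
  apply List.filter_congr
  intro i hi
  have : i < a + 2*t + 2 := by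
    have := List.mem_range.mp hi; omega
  rw [pvSel_cast a t i this]

theorem pvMoved_shrink (X : List Int) (a t : Nat) (hX : X.length ≤ a + 2*t + 2) :
    pvMoved X a (t+1) = pvMoved X a t := by
  unfold pvMoved
  congr 1
  apply List.filter_congr
  intro i hi
  have : i < a + 2*t + 2 := by
    have := List.mem_range.mp hi; omega
  rw [pvSel_cast a t i this]

theorem pvKept_short (X : List Int) (a t : Nat) (h : X.length ≤ a) : pvKept X a t = X := by
  unfold pvKept
  have := pv_allTrue_seg X (fun i => !pvSel a t i) (by
    intro j hj
    simp [pvSel_false_of_lt a t j (by omega)])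
  exact this

theorem pvMoved_short (X : List Int) (a t : Nat) (h : X.length ≤ a) : pvMoved X a t = [] := by
  unfold pvMoved
  exact pv_allFalse_seg X _ (fun j hj => pvSel_false_of_lt a t j (by omega))

theorem pv_step (arr : List Int) (q : Nat) (hq : q < arr.length) :
    (match PySem.List.pop? arr ((q : Nat) : Int) with
      | some (x, rest) => rest ++ [x]
      | none => arr)
    = (arr.take q ++ arr.drop (q+1)) ++ [arr.getD q 0] := by
  rw [PySem.List.pop?_natCast arr q hq]
  simp [List.eraseIdx_eq_take_drop_succ, List.getD_eq_getElem?_getD, List.getElem?_eq_getElem hq]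

theorem pv_decomp (arr : List Int) (q : Nat) (hq : q < arr.length) :
    arr = arr.take q ++ arr.getD q 0 :: arr.drop (q+1) := by
  conv_lhs => rw [← List.take_append_drop q arr]
  rw [List.drop_eq_getElem_cons hq]
  simp [List.getD_eq_getElem?_getD, List.getElem?_eq_getElem hq]

-- A's second-phase loop computes the kept/moved partition
theorem pv_loop2 (a t : Nat) (arr : List Int) (h : a + 2*t < arr.length) :
    (PySem.List.pyRange ((t : Nat) : Int) (-1) (-1)).foldl
      (fun st j => match PySem.List.pop? st ((a : Int) + 2 * j) with
        | some (x, rest) => rest ++ [x]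
        | none => st) arr
    = pvKept arr a t ++ (pvMoved arr a t).reverse := by
  induction t generalizing arr with
  | zero =>
    have hr : PySem.List.pyRange ((0 : Nat) : Int) (-1) (-1) = [0] := by
      rw [show (((0 : Nat) : Int)) = (0 : Int) by norm_num,
        PySem.List.pyRange_neg_one_cons (by omega),
        show ((0 : Int) - 1) = (-1 : Int) by norm_num,
        PySem.List.pyRange_neg_one_eq_nil (by omega)]
    rw [hr]
    simp only [List.foldl_cons, List.foldl_nil]
    have hidx : (a : Int) + 2 * 0 = ((a : Nat) : Int) := by norm_num
    rw [hidx, pv_step arr a (by omega)]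
    have hd := pv_decomp arr a (by omega)
    set X := arr.take a with hX
    set v := arr.getD a 0 with hv
    set Y := arr.drop (a+1) with hY
    have hXlen : X.length = a := by
      rw [hX, List.length_take]; omega
    rw [hd, pvKept_top X Y v a 0 (by omega), pvMoved_top X Y v a 0 (by omega),
      pvKept_short X a 0 (by omega), pvMoved_short X a 0 (by omega)]
    simp
  | succ t ih =>
    have hcast : (((t+1 : Nat)) : Int) = ((t : Nat) : Int) + 1 := by push_cast; ring
    rw [hcast, PySem.List.pyRange_neg_one_cons (by omega),
      show (((t : Nat) : Int) + 1 - 1) = ((t : Nat) : Int) by ring]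
    simp only [List.foldl_cons]
    set q := a + 2*t + 2 with hq
    have hidx : (a : Int) + 2 * (((t : Nat) : Int) + 1) = ((q : Nat) : Int) := by
      rw [hq]; push_cast; ring
    rw [hidx, pv_step arr q (by omega)]
    have hd := pv_decomp arr q (by omega)
    set X := arr.take q with hX
    set v := arr.getD q 0 with hv
    set Y := arr.drop (q+1) with hY
    have hXlen : X.length = q := by
      rw [hX, List.length_take]; omega
    have hst : (X ++ Y) ++ [v] = X ++ (Y ++ [v]) := by simp
    rw [hst, ih (X ++ (Y ++ [v])) (by simp [hXlen, hY]; omega)]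
    rw [pvKept_append_past X (Y ++ [v]) a t (by omega),
      pvMoved_append_past X (Y ++ [v]) a t (by omega)]
    rw [hd, pvKept_top X Y v a (t+1) (by omega), pvMoved_top X Y v a (t+1) (by omega),
      pvKept_shrink X a t (by omega), pvMoved_shrink X a t (by omega)]
    simp

-- B's Int-valued selector agrees with pvSel on casts
theorem pv_selB_cast (idx s : Int) (ha : 0 ≤ idx) (hs : 0 ≤ s) (k : Nat) :
    (decide (idx ≤ (k : Int)) && decide ((k : Int) ≤ idx + 2 * s)
      && (PySem.Int.mod ((k : Int) - idx) 2 == 0))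
    = pvSel idx.toNat s.toNat k := by
  rw [pvSel_eq_decide]
  by_cases hk : idx ≤ (k : Int)
  · have h1 : ((k : Int) - idx) = ((k - idx.toNat : Nat) : Int) := by omega
    have h2 : ((2 : Int)) = ((2 : Nat) : Int) := by norm_num
    rw [h1, h2, PySem.Int.mod_natCast]
    have h3 : ((((k - idx.toNat) % 2 : Nat) : Int) == 0) = decide ((k - idx.toNat) % 2 = 0) := by
      by_cases hz : (k - idx.toNat) % 2 = 0
      · simp [hz]
      · simp [hz]
        omega
    rw [h3]
    simp only [← Bool.decide_and, decide_eq_decide]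
    omega
  · have h5 : decide (idx ≤ (k : Int)) = false := by simp [hk]
    rw [h5]
    simp only [Bool.false_and]
    symm
    exact decide_eq_false (by omega)

-- B's filtered enumerate computes pvKept / pvMoved
theorem pv_altKept (arr : List Int) (idx s : Int) (ha : 0 ≤ idx) (hs : 0 ≤ s) :
    (((PySem.List.enumerate arr).filter (fun q => !(decide (idx ≤ q.1)
        && decide (q.1 ≤ idx + 2 * s) && (PySem.Int.mod (q.1 - idx) 2 == 0)))).map
      (fun q => q.2))
    = pvKept arr idx.toNat s.toNat := by
  rw [PySem.List.enumerate_eq_map_pyRange arr 0]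
  simp only [PySem.List.len_eq]
  rw [PySem.List.pyRange_zero_natCast, List.map_map, List.filter_map, List.map_map]
  unfold pvKept
  have hf : ∀ k : Nat, ((fun (q : Int × Int) => !(decide (idx ≤ q.1)
        && decide (q.1 ≤ idx + 2 * s) && (PySem.Int.mod (q.1 - idx) 2 == 0)))
      ∘ ((fun j => (j, PySem.List.pyGetD arr j 0)) ∘ (fun k : Nat => (k : Int)))) k
      = !(pvSel idx.toNat s.toNat k) := by
    intro k
    simp only [Function.comp]
    exact congrArg (fun b => !b) (pv_selB_cast idx s ha hs k)
  rw [List.filter_congr (fun k _ => hf k)]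
  apply List.map_congr_left
  intro k hk
  simp only [Function.comp]
  exact PySem.List.pyGetD_natCast arr k 0

theorem pv_altMoved (arr : List Int) (idx s : Int) (ha : 0 ≤ idx) (hs : 0 ≤ s) :
    (((PySem.List.enumerate arr).filter (fun q => decide (idx ≤ q.1)
        && decide (q.1 ≤ idx + 2 * s) && (PySem.Int.mod (q.1 - idx) 2 == 0))).map
      (fun q => q.2))
    = pvMoved arr idx.toNat s.toNat := by
  rw [PySem.List.enumerate_eq_map_pyRange arr 0]
  simp only [PySem.List.len_eq]
  rw [PySem.List.pyRange_zero_natCast, List.map_map, List.filter_map, List.map_map]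
  unfold pvMoved
  have hf : ∀ k : Nat, ((fun (q : Int × Int) => decide (idx ≤ q.1)
        && decide (q.1 ≤ idx + 2 * s) && (PySem.Int.mod (q.1 - idx) 2 == 0))
      ∘ ((fun j => (j, PySem.List.pyGetD arr j 0)) ∘ (fun k : Nat => (k : Int)))) k
      = pvSel idx.toNat s.toNat k := by
    intro k
    simp only [Function.comp]
    exact pv_selB_cast idx s ha hs k
  rw [List.filter_congr (fun k _ => hf k)]
  apply List.map_congr_left
  intro k hk
  simp only [Function.comp]
  exact PySem.List.pyGetD_natCast arr k 0

-- Python's insert past the end appends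
theorem pv_insert_ge (xs : List Int) (i : Int) (v : Int) (h : (xs.length : Int) ≤ i) :
    PySem.List.insert xs i v = xs ++ [v] := by
  unfold PySem.List.insert PySem.List.sliceIndices
  simp only
  have h1 : ¬((1 : Int) < 0) := by omega
  have h2 : ¬(i < 0) := by omega
  rw [if_neg h1, if_neg h1, if_neg h2]
  have h3 : min i ((xs.length : Nat) : Int) = (xs.length : Int) := by omega
  rw [h3]
  simp

-- A's rotation loop is List.rotate
theorem pv_rotFold (k : Nat) (arr : List Int) (h : arr ≠ []) :
    (PySem.List.pyRange 0 ((k : Nat) : Int) 1).foldl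
      (fun st _ => match PySem.List.pop? st 0 with
        | some (x, rest) => PySem.List.insert rest ((st.length : Nat) : Int) x
        | none => st) arr
    = arr.rotate k := by
  induction k with
  | zero =>
    rw [show (((0 : Nat) : Int)) = (0 : Int) by norm_num, PySem.List.pyRange_one_eq_nil (by omega)]
    simp
  | succ k ih =>
    rw [show (((k+1 : Nat)) : Int) = ((k : Nat) : Int) + 1 by push_cast; ring,
      PySem.List.pyRange_one_succ_right (by omega), List.foldl_append, ih]
    simp only [List.foldl_cons, List.foldl_nil]
    have hne : arr.rotate k ≠ [] := by
      intro hc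
      rw [List.rotate_eq_nil_iff] at hc
      exact h hc
    obtain ⟨x, tl, hx⟩ : ∃ x tl, arr.rotate k = x :: tl := by
      cases hcase : arr.rotate k with
      | nil => exact absurd hcase hne
      | cons x tl => exact ⟨x, tl, rfl⟩
    rw [hx, PySem.List.pop?_zero_cons]
    simp only
    rw [pv_insert_ge tl _ x (by simp)]
    have : (x :: tl).rotate 1 = tl ++ [x] := by
      rw [List.rotate_cons_succ]
      simp
    rw [← this, ← hx, List.rotate_rotate]

-- phase 3 assembled: A's rotation loop equals B's slice rotation
theorem pv_phase3_eq (arr2 : List Int) (nloop : Int)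
    (hne : 0 < nloop → arr2 ≠ []) :
    (PySem.List.pyRange 0 nloop 1).foldl (fun st _ =>
      match PySem.List.pop? st 0 with
      | some (x, rest) => PySem.List.insert rest (st.length : Int) x
      | none => st) arr2
    = if 0 < nloop then
        arr2.drop (PySem.Int.mod nloop (arr2.length : Int)).toNat
          ++ arr2.take (PySem.Int.mod nloop (arr2.length : Int)).toNat
      else arr2 := by
  by_cases hl : 0 < nloop
  · rw [if_pos hl]
    have hne' := hne hl
    have hn : (0 : Int) < (arr2.length : Int) := by
      cases arr2 with
      | nil => exact absurd rfl hne'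
      | cons a l => simp
    rw [show nloop = ((nloop.toNat : Nat) : Int) from by omega, pv_rotFold nloop.toNat arr2 hne']
    have hr : (PySem.Int.mod ((nloop.toNat : Nat) : Int) (arr2.length : Int)).toNat
        = nloop.toNat % arr2.length := by
      rw [PySem.Int.mod_eq_emod_of_pos hn]
      omega
    rw [hr]
    have hmod : nloop.toNat % arr2.length < arr2.length := Nat.mod_lt _ (by omega)
    rw [← List.rotate_mod, List.rotate_eq_drop_append_take (by omega)]
  · rw [if_neg hl, PySem.List.pyRange_one_eq_nil (by omega)]
    rfl

theorem pv_partition_length (arr : List Int) (a t : Nat) :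
    (pvKept arr a t ++ (pvMoved arr a t).reverse).length = arr.length := by
  have hsum := List.length_eq_length_filter_add (l := List.range arr.length)
    (fun i => pvSel a t i)
  simp only [pvKept, pvMoved, List.length_append, List.length_map, List.length_reverse,
    List.length_range] at *
  omega

theorem pv_phase1_len (xs : List Int) (b : Int) :
    (PySem.List.slice xs none (some b)).length + (PySem.List.slice xs (some b) none).length
    = xs.length := by
  by_cases hb : 0 ≤ b
  · rw [PySem.List.slice_to xs hb, PySem.List.slice_from xs hb]
    simp only [List.length_take, List.length_drop]
    omega
  · have hk : b = -(((-b).toNat : Nat) : Int) := by omega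
    rw [hk, PySem.List.slice_to_neg_natCast xs (-b).toNat (by omega),
      PySem.List.slice_from_neg_natCast xs (-b).toNat (by omega)]
    simp only [List.length_take, List.length_drop]
    omega

theorem pv_main (nodeIds e : List Int)
    (hPre : Pre_rearrangeNodeIds nodeIds e) :
    rearrangeNodeIds nodeIds e = rearrangeNodeIds_alt nodeIds e := by
  simp only [Pre_rearrangeNodeIds] at hPre
  obtain ⟨h3, hP2, hP3⟩ := hPre
  simp only [rearrangeNodeIds, rearrangeNodeIds_alt]
  generalize he0 : PySem.List.pyGetD e 0 0 = e0 at hP2 ⊢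
  generalize he1 : PySem.List.pyGetD e 1 0 = e1 at hP2 hP3 ⊢
  generalize he2 : PySem.List.pyGetD e 2 0 = e2 at hP2 hP3 ⊢
  generalize hidx : e1 - 1 - 2 * (e2 - 1) = idx at hP2 ⊢
  generalize hgs : e0 - 4 - 2 * (e2 - 1) = s at hP2 ⊢
  generalize hnl : Int.tdiv (e1 - 2 * e2) 2 = nloop at hP3 ⊢
  -- phase 1 is the same expression in both ports
  generalize harr1 : PySem.List.slice nodeIds none (some (-idx))
      ++ (PySem.List.slice nodeIds (some (-idx)) none).reverse = arr1
  have hlen1 : arr1.length = nodeIds.length := by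
    rw [← harr1]
    simp only [List.length_append, List.length_reverse]
    exact pv_phase1_len nodeIds (-idx)
  -- phase 2
  by_cases hcs : 0 ≤ s
  · rw [if_pos hcs]
    obtain ⟨hn0, hidx0, hhi⟩ := hP2 hcs
    rw [show idx = ((idx.toNat : Nat) : Int) from by omega,
      show s = ((s.toNat : Nat) : Int) from by omega] at hhi ⊢
    rw [pv_loop2 idx.toNat s.toNat arr1 (by omega)]
    rw [pv_altKept arr1 ((idx.toNat : Nat) : Int) ((s.toNat : Nat) : Int) (by omega) (by omega),
      pv_altMoved arr1 ((idx.toNat : Nat) : Int) ((s.toNat : Nat) : Int) (by omega) (by omega)]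
    simp only [Int.toNat_natCast]
    have hlen2 : (pvKept arr1 idx.toNat s.toNat ++ (pvMoved arr1 idx.toNat s.toNat).reverse).length
        = nodeIds.length := by
      rw [pv_partition_length]
      exact hlen1
    generalize harr2 : pvKept arr1 idx.toNat s.toNat ++ (pvMoved arr1 idx.toNat s.toNat).reverse = arr2 at hlen2 ⊢
    exact pv_phase3_eq arr2 nloop (fun hl => by
      have := hP3 hl
      intro hc
      rw [hc] at hlen2
      simp at hlen2
      omega)
  · rw [if_neg hcs, PySem.List.pyRange_neg_one_eq_nil (by omega : s ≤ -1), List.foldl_nil]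
    exact pv_phase3_eq arr1 nloop (fun hl => by
      have := hP3 hl
      intro hc
      rw [hc] at hlen1
      simp at hlen1
      omega)
-- ===== VERDICT (by name: the statement is the Claim_ definition above) =====
theorem rearrangeNodeIds_spec : Claim_equal_rearrangeNodeIds := by
  intro nodeIds e _hDom hPre
  exact pv_main nodeIds e hPre
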